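-- pv_equiv track=rewrite | github.com/MatthewTess/CSE15-Discrete-Mathematics | 015/Lab5/lab_5.py | is_surjective
-- ===== SOURCE A (Python) =====
-- def is_surjective(A, B, f):
--     for element in B:
--         count = 0
--         b = element
--         for other in f:
--             count += other.count(b)
--         if count == 0:
--             return False
--     return True
-- ===== SOURCE B (Python) =====
-- def is_surjective(A, B, f):
--     remaining = set(B)
--     for other in f:
--         for x in other:
--             remaining.discard(x)
--         if not remaining:
--             return True
--     return not remaining
-- ===== Notes on version B (the rewrite author's own statement) =====
-- stated objective: faster
-- what changed: Instead of scanning all of f once per element of B (counting occurrences), B builds a shrinking worklist set(B), makes a single pass over f discarding every value it sees, and returns True as soon as the worklist empties.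
import Mathlib
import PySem

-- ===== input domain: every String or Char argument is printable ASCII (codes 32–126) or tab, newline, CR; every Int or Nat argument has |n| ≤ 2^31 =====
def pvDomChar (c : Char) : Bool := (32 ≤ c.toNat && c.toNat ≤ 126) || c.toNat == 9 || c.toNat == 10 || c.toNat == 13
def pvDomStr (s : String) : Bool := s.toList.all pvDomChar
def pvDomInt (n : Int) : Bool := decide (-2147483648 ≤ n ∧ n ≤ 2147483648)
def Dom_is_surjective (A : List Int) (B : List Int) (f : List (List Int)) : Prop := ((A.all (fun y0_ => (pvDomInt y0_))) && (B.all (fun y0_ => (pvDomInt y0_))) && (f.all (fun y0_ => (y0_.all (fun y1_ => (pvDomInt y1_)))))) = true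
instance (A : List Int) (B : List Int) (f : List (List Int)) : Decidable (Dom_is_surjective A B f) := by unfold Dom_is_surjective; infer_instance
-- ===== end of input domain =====

-- B replaces A's per-element rescans of f by one pass over f discarding from a worklist set(B), with early exit; return value equivalence only.

-- ===== PORT A =====
-- outer 'for element in B' loop; the inner 'for other in f: count += other.count(b)' is the foldl
def isSurjA_loop (f : List (List Int)) : List Int → Bool
  | [] => true
  | element :: rest =>
    let b := element
    let count : Int := f.foldl (fun acc other => acc + (PySem.List.count other b : Int)) 0
    if count == 0 then false else isSurjA_loop f rest

def is_surjective (A : List Int) (B : List Int) (f : List (List Int)) : Bool :=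
  isSurjA_loop f B

-- ===== PORT B =====
-- 'for other in f' loop over a shrinking worklist; 'for x in other: remaining.discard(x)' is the inner foldl
def isSurjB_loop : List (List Int) → PySem.Set Int → Bool
  | [], remaining => remaining.isEmpty
  | other :: rest, remaining =>
    let remaining' := other.foldl PySem.Set.discard remaining
    if remaining'.isEmpty then true else isSurjB_loop rest remaining'

def is_surjective_alt (A : List Int) (B : List Int) (f : List (List Int)) : Bool :=
  isSurjB_loop f (PySem.Set.ofList B)

-- ===== PRECONDITION & SPEC =====
def Spec_is_surjective (A : List Int) (B : List Int) (f : List (List Int)) (out : Bool) : Prop := out = is_surjective_alt A B f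
instance (A : List Int) (B : List Int) (f : List (List Int)) (out : Bool) : Decidable (Spec_is_surjective A B f out) := by unfold Spec_is_surjective; infer_instance

-- ===== CLAIM (what is proved, stated in full; the proofs are below) =====
def Claim_equal_is_surjective : Prop := ∀ (A : List Int) (B : List Int) (f : List (List Int)), Dom_is_surjective A B f → Spec_is_surjective A B f (is_surjective A B f)

-- ===== LEMMAS AND PROOFS =====

lemma countA_eq (b : Int) (f : List (List Int)) (acc : Int) :
    f.foldl (fun acc other => acc + (PySem.List.count other b : Int)) acc
      = acc + ((f.map (fun o => o.count b)).sum : Nat) := by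
  induction f generalizing acc with
  | nil => simp
  | cons o rest ih =>
    rw [List.foldl_cons, ih, List.map_cons, List.sum_cons]
    simp only [PySem.List.count_eq]
    push_cast
    ring

lemma isSurjA_loop_iff (f : List (List Int)) (B : List Int) :
    isSurjA_loop f B = true ↔ ∀ b ∈ B, ∃ row ∈ f, b ∈ row := by
  induction B with
  | nil => simp [isSurjA_loop]
  | cons b rest ih =>
    simp only [isSurjA_loop, countA_eq, List.mem_cons, forall_eq_or_imp]
    rw [show ((0 : Int) + ((f.map (fun o => o.count b)).sum : Nat) == 0)
          = decide ((f.map (fun o => o.count b)).sum = 0) by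
        rcases Nat.eq_zero_or_pos ((f.map (fun o => o.count b)).sum) with h | h
        · simp [h]
        · simp only [zero_add]
          rw [decide_eq_false (by omega)]
          apply beq_false_of_ne
          omega]
    by_cases h : (f.map (fun o => o.count b)).sum = 0
    · have hb : ¬ ∃ row ∈ f, b ∈ row := by
        rw [List.sum_eq_zero_iff] at h
        rintro ⟨row, hrow, hmem⟩
        have := h (row.count b) (List.mem_map_of_mem hrow)
        exact (List.count_eq_zero.mp this) hmem
      simp [h, hb]
    · have hb : ∃ row ∈ f, b ∈ row := by
        have : ∃ n ∈ f.map (fun o => o.count b), n ≠ 0 := by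
          by_contra hc
          push_neg at hc
          exact h (List.sum_eq_zero_iff.mpr fun n hn => hc n hn)
        rcases this with ⟨n, hn, hne⟩
        rcases List.mem_map.mp hn with ⟨row, hrow, hcnt⟩
        exact ⟨row, hrow, List.count_pos_iff.mp (by omega)⟩
      simp [h, hb, ih]

lemma mem_foldl_discard (other : List Int) (r : PySem.Set Int) (x : Int) :
    x ∈ other.foldl PySem.Set.discard r ↔ x ∈ r ∧ x ∉ other := by
  induction other generalizing r with
  | nil => simp
  | cons y rest ih =>
    simp only [List.foldl_cons, ih, PySem.Set.mem_discard, List.mem_cons]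
    tauto

lemma isSurjB_loop_iff (f : List (List Int)) (r : PySem.Set Int) :
    isSurjB_loop f r = true ↔ ∀ x ∈ r, ∃ row ∈ f, x ∈ row := by
  induction f generalizing r with
  | nil =>
    simp [isSurjB_loop, List.isEmpty_iff, List.eq_nil_iff_forall_not_mem]
  | cons o rest ih =>
    simp only [isSurjB_loop]
    split_ifs with h
    · rw [List.isEmpty_iff, List.eq_nil_iff_forall_not_mem] at h
      simp only [true_iff]
      intro x hx
      refine ⟨o, List.mem_cons_self .., ?_⟩
      by_contra hxo
      exact h x ((mem_foldl_discard o r x).mpr ⟨hx, hxo⟩)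
    · rw [ih]
      constructor
      · intro hall x hx
        by_cases hxo : x ∈ o
        · exact ⟨o, List.mem_cons_self .., hxo⟩
        · rcases hall x ((mem_foldl_discard o r x).mpr ⟨hx, hxo⟩) with ⟨row, hrow, hmem⟩
          exact ⟨row, List.mem_cons_of_mem _ hrow, hmem⟩
      · intro hall x hx
        rw [mem_foldl_discard] at hx
        rcases hall x hx.1 with ⟨row, hrow, hmem⟩
        rcases List.mem_cons.mp hrow with rfl | hrow'
        · exact absurd hmem hx.2
        · exact ⟨row, hrow', hmem⟩

lemma ports_agree (A B : List Int) (f : List (List Int)) :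
    is_surjective A B f = is_surjective_alt A B f := by
  rw [Bool.eq_iff_iff, is_surjective, is_surjective_alt, isSurjA_loop_iff, isSurjB_loop_iff]
  constructor
  · intro h x hx
    exact h x ((PySem.Set.mem_ofList _ _).mp hx)
  · intro h b hb
    exact h b ((PySem.Set.mem_ofList _ _).mpr hb)

-- ===== VERDICT (by name: the statement is the Claim_ definition above) =====
theorem is_surjective_spec : Claim_equal_is_surjective := by
  intro A B f _
  exact ports_agree A B f
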